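-- pv_equiv track=rewrite | github.com/MrBrantCode/unitest_baseline | mut_generate/mist_train_cf/cf_101338/solution.py | generate_nested_loop
-- ===== SOURCE A (Python) =====
-- def generate_nested_loop(depth, sequence):
--     if depth == 0:
--         return [()]
--     else:
--         result = []
--         for i in range(len(sequence)):
--             inner_sequences = generate_nested_loop(depth - 1, sequence[i+1:])
--             for inner_sequence in inner_sequences:
--                 result.append((sequence[i],) + inner_sequence)
--         return result
-- ===== SOURCE B (Python) =====
-- def generate_nested_loop(depth, sequence):
--     # include/exclude recursion on the head instead of an index loop with slices
--     if depth == 0: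
--         return [()]
--     if depth < 0 or depth > len(sequence):
--         return []
--     head, tail = sequence[0], sequence[1:]
--     with_head = [(head,) + rest for rest in generate_nested_loop(depth - 1, tail)]
--     return with_head + generate_nested_loop(depth, tail)
-- ===== Notes on version B (the rewrite author's own statement) =====
-- stated objective: alternative
-- what changed: Replaces A's index loop over suffix slices (recursing only on depth) by a binary include/exclude recursion on the list head with an infeasible-depth prune (depth<0 or depth>len returns [] immediately).
import Mathlib
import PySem

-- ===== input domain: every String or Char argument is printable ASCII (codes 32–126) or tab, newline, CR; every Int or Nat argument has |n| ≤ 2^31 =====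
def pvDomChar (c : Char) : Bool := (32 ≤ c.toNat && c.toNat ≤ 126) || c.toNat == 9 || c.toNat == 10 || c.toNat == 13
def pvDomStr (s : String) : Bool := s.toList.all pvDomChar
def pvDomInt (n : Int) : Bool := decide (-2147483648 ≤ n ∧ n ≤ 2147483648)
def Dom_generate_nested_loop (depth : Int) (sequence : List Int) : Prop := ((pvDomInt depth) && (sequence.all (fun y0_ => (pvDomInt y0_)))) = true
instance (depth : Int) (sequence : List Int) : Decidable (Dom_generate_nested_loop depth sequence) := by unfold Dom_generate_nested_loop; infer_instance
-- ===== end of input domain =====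

-- B replaces A's index loop over suffix slices by an include/exclude recursion on the
-- list head with an infeasible-depth prune; objective: alternative decomposition.

-- ===== PORT A =====
-- A's recursion shrinks the sequence (slice from i+1 ≥ 1), so sequence.length + 1 steps of
-- fuel always suffice; the fuel only makes the same computation total.
def generate_nested_loop_aux (fuel : Nat) (depth : Int) (sequence : List Int) : List (List Int) :=
  match fuel with
  | 0 => []
  | fuel + 1 =>
    if depth = 0 then [[]]
    else
      (PySem.List.pyRange 0 sequence.length 1).foldl
        (fun result i =>
          result ++
            (generate_nested_loop_aux fuel (depth - 1)
                (PySem.List.slice sequence (some (i + 1)) none)).map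
              (fun inner => PySem.List.pyGetD sequence i 0 :: inner)) []

def generate_nested_loop (depth : Int) (sequence : List Int) : List (List Int) :=
  generate_nested_loop_aux (sequence.length + 1) depth sequence

-- ===== PORT B =====
def generate_nested_loop_alt (depth : Int) (sequence : List Int) : List (List Int) :=
  if depth = 0 then [[]]
  else if depth < 0 ∨ (sequence.length : Int) < depth then []
  else
    match sequence with
    | [] => []  -- unreachable here (1 ≤ depth ≤ length forces a nonempty list)
    | h :: t =>
      ((generate_nested_loop_alt (depth - 1) t).map (fun rest => h :: rest)) ++
        generate_nested_loop_alt depth t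

-- ===== PRECONDITION & SPEC =====
def Spec_generate_nested_loop (depth : Int) (sequence : List Int) (out : List (List Int)) : Prop := out = generate_nested_loop_alt depth sequence
instance (depth : Int) (sequence : List Int) (out : List (List Int)) : Decidable (Spec_generate_nested_loop depth sequence out) := by unfold Spec_generate_nested_loop; infer_instance

-- ===== CLAIM (what is proved, stated in full; the proofs are below) =====
def Claim_equal_generate_nested_loop : Prop := ∀ (depth : Int) (sequence : List Int), Dom_generate_nested_loop depth sequence → Spec_generate_nested_loop depth sequence (generate_nested_loop depth sequence)

-- ===== LEMMAS AND PROOFS =====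

lemma alt_eq_nil_of_lt (d : Int) (s : List Int) (h : (s.length : Int) < d) :
    generate_nested_loop_alt d s = [] := by
  have hd : d ≠ 0 := by omega
  unfold generate_nested_loop_alt
  rw [if_neg hd, if_pos (Or.inr h)]

lemma alt_eq_nil_of_neg (d : Int) (s : List Int) (h : d < 0) :
    generate_nested_loop_alt d s = [] := by
  have hd : d ≠ 0 := by omega
  unfold generate_nested_loop_alt
  rw [if_neg hd, if_pos (Or.inl h)]

lemma flatMap_eq_alt (d : Int) (hd : 0 < d) :
    ∀ s : List Int,
      (PySem.List.pyRange 0 s.length 1).flatMap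
        (fun i =>
          (generate_nested_loop_alt (d - 1)
              (PySem.List.slice s (some (i + 1)) none)).map
            (fun inner => PySem.List.pyGetD s i 0 :: inner))
        = generate_nested_loop_alt d s := by
  intro s
  induction s with
  | nil =>
    rw [PySem.List.pyRange_one_eq_nil (by simp)]
    rw [alt_eq_nil_of_lt d [] (by simpa using hd)]
    simp
  | cons h t ih =>
    rw [PySem.List.pyRange_one_cons (by
      simp only [List.length_cons]; push_cast; omega)]
    rw [List.flatMap_cons]
    have hfirst :
        (generate_nested_loop_alt (d - 1)
            (PySem.List.slice (h :: t) (some ((0 : Int) + 1)) none)).map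
          (fun inner => PySem.List.pyGetD (h :: t) 0 0 :: inner)
          = (generate_nested_loop_alt (d - 1) t).map (fun rest => h :: rest) := by
      have hsl : PySem.List.slice (h :: t) (some ((0 : Int) + 1)) none = t := by
        rw [show ((0 : Int) + 1) = 1 by ring, PySem.List.slice_from_one]
        rfl
      rw [hsl, PySem.List.pyGetD_zero_cons]
    have hrest :
        (PySem.List.pyRange (0 + 1) (↑(h :: t).length) 1).flatMap
          (fun i =>
            (generate_nested_loop_alt (d - 1)
                (PySem.List.slice (h :: t) (some (i + 1)) none)).map
              (fun inner => PySem.List.pyGetD (h :: t) i 0 :: inner))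
          = generate_nested_loop_alt d t := by
      rw [← ih]
      rw [PySem.List.pyRange_one (0 + 1), PySem.List.pyRange_one 0]
      have hlen : (((h :: t).length : Int) - (0 + 1)).toNat = ((t.length : Int) - 0).toNat := by
        simp only [List.length_cons]; push_cast; omega
      rw [hlen, List.flatMap_map, List.flatMap_map]
      apply List.flatMap_congr
      intro k _
      have hsl : PySem.List.slice (h :: t) (some ((0 + 1 + (k : Int)) + 1)) none
          = PySem.List.slice t (some ((0 + (k : Int)) + 1)) none := by
        rw [PySem.List.slice_from _ (by omega),
            PySem.List.slice_from _ (by omega)]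
        have h1 : ((0 : Int) + 1 + (k : Int) + 1).toNat = k + 2 := by omega
        have h2 : ((0 : Int) + (k : Int) + 1).toNat = k + 1 := by omega
        rw [h1, h2, List.drop_succ_cons]
      have hget : PySem.List.pyGetD (h :: t) (0 + 1 + (k : Int)) 0
          = PySem.List.pyGetD t (0 + (k : Int)) 0 := by
        have e1 : (0 : Int) + 1 + (k : Int) = ((k + 1 : Nat) : Int) := by push_cast; ring
        have e2 : (0 : Int) + (k : Int) = ((k : Nat) : Int) := by ring
        rw [e1, e2, PySem.List.pyGetD_natCast, PySem.List.pyGetD_natCast]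
        simp
      rw [hsl, hget]
    rw [hfirst, hrest]
    by_cases hbig : (((h :: t).length : Int) < d)
    · have hn : ((t.length : Int)) < d - 1 := by
        simp only [List.length_cons] at hbig; push_cast at hbig ⊢; omega
      rw [alt_eq_nil_of_lt (d - 1) t hn, alt_eq_nil_of_lt d t (by omega),
          alt_eq_nil_of_lt d (h :: t) hbig]
      simp
    · conv_rhs => rw [generate_nested_loop_alt.eq_def]
      rw [if_neg (by omega : d ≠ 0), if_neg (by push Not; exact ⟨by omega, by omega⟩)]

lemma aux_eq_alt : ∀ (fuel : Nat) (d : Int) (s : List Int), s.length < fuel →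
    generate_nested_loop_aux fuel d s = generate_nested_loop_alt d s := by
  intro fuel
  induction fuel with
  | zero => intro d s h; omega
  | succ fuel ih =>
    intro d s h
    rw [generate_nested_loop_aux]
    by_cases hd : d = 0
    · subst hd
      rw [if_pos rfl]
      rw [generate_nested_loop_alt.eq_def]
      rw [if_pos rfl]
    · rw [if_neg hd]
      have hcongr := PySem.List.foldl_congr_mem
        (l := PySem.List.pyRange 0 (s.length : Int) 1)
        (init := ([] : List (List Int)))
        (f := fun result i =>
          result ++
            (generate_nested_loop_aux fuel (d - 1)
                (PySem.List.slice s (some (i + 1)) none)).map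
              (fun inner => PySem.List.pyGetD s i 0 :: inner))
        (g := fun result i =>
          result ++
            (generate_nested_loop_alt (d - 1)
                (PySem.List.slice s (some (i + 1)) none)).map
              (fun inner => PySem.List.pyGetD s i 0 :: inner))
        (by
          intro acc x hx
          rw [PySem.List.mem_pyRange_one] at hx
          have hsl : (PySem.List.slice s (some (x + 1)) none).length < fuel := by
            rw [PySem.List.slice_from _ (by omega)]
            rw [List.length_drop]
            omega
          dsimp only
          rw [ih (d - 1) _ hsl])
      rw [hcongr, PySem.List.foldl_append_eq_flatMap, List.nil_append]
      rcases lt_or_gt_of_ne hd with hneg | hpos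
      · rw [alt_eq_nil_of_neg d s hneg, List.flatMap_eq_nil_iff]
        intro x _
        rw [alt_eq_nil_of_neg (d - 1) _ (by omega)]
        simp
      · exact flatMap_eq_alt d hpos s

-- ===== VERDICT (by name: the statement is the Claim_ definition above) =====
theorem generate_nested_loop_spec : Claim_equal_generate_nested_loop := by
  intro d s _
  unfold Spec_generate_nested_loop generate_nested_loop
  exact aux_eq_alt (s.length + 1) d s (by omega)
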